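-- pv_equiv track=rewrite | github.com/ConnorWeng/Numera-Strapi | scripts/called.py | make_mobile_check_pdu
-- ===== SOURCE A (Python) =====
-- def make_mobile_check_pdu(data):
--     operator = data["operator"]
--     phone = data["phone"]
--     if operator == "CMCC":
--         prefix = "0891683108200105F071000D9168"
--     elif operator == "CUCC":
--         prefix = "0891683110808805F071000D9168"
--     else:
--         prefix = "0891688109520000F071000D9168"
--     if len(phone) % 2 != 0:
--         phone += "F"
--     odd_chars = ''
--     even_chars = ''
--     for i in range(len(phone)):
--         if i % 2 == 0:
--             even_chars += phone[i]
--         else: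
--             odd_chars += phone[i]
--     phone_encoded = ''
--     for i in range(len(even_chars)):
--         phone_encoded += odd_chars[i] + even_chars[i]
--     suffix = "0004000B0605040050000000000000\x1a\r"
--     return prefix + phone_encoded + suffix
-- ===== SOURCE B (Python) =====
-- def make_mobile_check_pdu(data):
--     operator = data["operator"]
--     phone = data["phone"]
--     if operator == "CMCC":
--         prefix = "0891683108200105F071000D9168"
--     elif operator == "CUCC":
--         prefix = "0891683110808805F071000D9168"
--     else:
--         prefix = "0891688109520000F071000D9168"
--     if len(phone) % 2 != 0:
--         phone += "F"
--     encoded = ""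
--     rest = phone
--     while len(rest) >= 2:
--         encoded += rest[1] + rest[0]
--         rest = rest[2:]
--     suffix = "0004000B0605040050000000000000\x1a\r"
--     return prefix + encoded + suffix
-- ===== Notes on version B (the rewrite author's own statement) =====
-- stated objective: alternative
-- what changed: Replaced A's two staged index loops (split the digits into even_chars/odd_chars by parity, then interleave them by index) with a single destructuring while-loop that repeatedly swaps the front pair of the remaining string and consumes it two characters at a time; the parity strings and all index arithmetic disappear.
import Mathlib
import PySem

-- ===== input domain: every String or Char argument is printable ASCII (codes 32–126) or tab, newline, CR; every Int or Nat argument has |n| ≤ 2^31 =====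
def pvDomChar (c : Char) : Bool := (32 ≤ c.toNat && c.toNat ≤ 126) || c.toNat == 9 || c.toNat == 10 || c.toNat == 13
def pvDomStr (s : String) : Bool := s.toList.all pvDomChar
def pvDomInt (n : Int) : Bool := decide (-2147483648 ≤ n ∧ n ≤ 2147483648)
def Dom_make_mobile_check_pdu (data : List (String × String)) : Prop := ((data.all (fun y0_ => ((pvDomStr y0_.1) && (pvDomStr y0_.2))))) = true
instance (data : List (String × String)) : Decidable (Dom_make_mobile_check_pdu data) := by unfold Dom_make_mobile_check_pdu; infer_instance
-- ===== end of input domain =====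

-- B replaces A's two staged parity loops with one while-loop that swaps and consumes the front pair; equivalence proved on dicts containing both keys.

-- ===== PORT A =====
def make_mobile_check_pdu (data : List (String × String)) : String :=
  match (PySem.Dict.mk data).get? "operator", (PySem.Dict.mk data).get? "phone" with
  | some operator, some phone0 =>
    let prefix_ : String :=
      if operator == "CMCC" then "0891683108200105F071000D9168"
      else if operator == "CUCC" then "0891683110808805F071000D9168"
      else "0891688109520000F071000D9168"
    let phone : List Char :=
      if PySem.Str.len phone0 % 2 ≠ 0 then phone0.toList ++ ['F'] else phone0.toList
    let eo : List Char × List Char :=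
      (PySem.List.pyRange 0 (PySem.List.len phone) 1).foldl
        (fun eo i =>
          if i % 2 == 0 then (eo.1 ++ [PySem.List.pyGetD phone i ' '], eo.2)
          else (eo.1, eo.2 ++ [PySem.List.pyGetD phone i ' '])) ([], [])
    let phone_encoded : List Char :=
      (PySem.List.pyRange 0 (PySem.List.len eo.1) 1).foldl
        (fun acc i => acc ++ [PySem.List.pyGetD eo.2 i ' ', PySem.List.pyGetD eo.1 i ' ']) []
    let suffix : String := "0004000B0605040050000000000000\x1a\r"
    prefix_ ++ String.mk phone_encoded ++ suffix
  | _, _ => ""   -- KeyError in Python: excluded by Pre_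

-- ===== PORT B =====
/-- B's while-loop: `encoded += rest[1] + rest[0]; rest = rest[2:]` while `len(rest) >= 2`. -/
def pduSwapLoop (encoded : List Char) (rest : List Char) : List Char :=
  if 2 ≤ PySem.List.len rest then
    pduSwapLoop (encoded ++ [PySem.List.pyGetD rest 1 ' ', PySem.List.pyGetD rest 0 ' '])
      (PySem.List.slice rest (some 2) none)
  else encoded
termination_by rest.length
decreasing_by
  rename_i h
  rw [PySem.List.slice_from rest (by norm_num : (0:Int) ≤ 2)]
  simp only [List.length_drop]
  simp [PySem.List.len_eq] at h
  omega

def make_mobile_check_pdu_alt (data : List (String × String)) : String :=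
  match (PySem.Dict.mk data).get? "operator" with
  | none => ""   -- KeyError in Python: excluded by Pre_
  | some operator =>
    match (PySem.Dict.mk data).get? "phone" with
    | none => ""   -- KeyError in Python: excluded by Pre_
    | some phone0 =>
      let prefix_ : String :=
        if operator == "CMCC" then "0891683108200105F071000D9168"
        else if operator == "CUCC" then "0891683110808805F071000D9168"
        else "0891688109520000F071000D9168"
      let phone : List Char :=
        if PySem.Str.len phone0 % 2 ≠ 0 then phone0.toList ++ ['F'] else phone0.toList
      let suffix : String := "0004000B0605040050000000000000\x1a\r"
      prefix_ ++ String.mk (pduSwapLoop [] phone) ++ suffix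

-- ===== PRECONDITION & SPEC =====
-- Pre_ excludes exactly the dicts missing the "operator" or "phone" key, on which the Python raises KeyError.
def Pre_make_mobile_check_pdu (data : List (String × String)) : Prop :=
  "operator" ∈ data.map Prod.fst ∧ "phone" ∈ data.map Prod.fst
instance (data : List (String × String)) : Decidable (Pre_make_mobile_check_pdu data) := by
  unfold Pre_make_mobile_check_pdu; infer_instance

def pvWitness_make_mobile_check_pdu : (List (String × String)) :=
  [("operator", "CMCC"), ("phone", "13812345678")]

def Spec_make_mobile_check_pdu (data : List (String × String)) (out : String) : Prop := out = make_mobile_check_pdu_alt data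
instance (data : List (String × String)) (out : String) : Decidable (Spec_make_mobile_check_pdu data out) := by unfold Spec_make_mobile_check_pdu; infer_instance

-- ===== CLAIM (what is proved, stated in full; the proofs are below) =====
def Claim_equal_make_mobile_check_pdu : Prop := ∀ (data : List (String × String)), Dom_make_mobile_check_pdu data → Pre_make_mobile_check_pdu data → Spec_make_mobile_check_pdu data (make_mobile_check_pdu data)

-- ===== LEMMAS AND PROOFS =====

/-- Parity split: `(split2 l).1` is the even-index chars, `.2` the odd-index ones. -/
def split2 : List Char → List Char × List Char
  | [] => ([], [])
  | a :: r => (a :: (split2 r).2, (split2 r).1)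

/-- The nibble-swapped pair list, the value B's loop accumulates. -/
def pairs : List Char → List Char
  | a :: b :: r => b :: a :: pairs r
  | _ => []

/-- Interleave `o` and `e` position by position (odd first), padding with ' '. -/
def ilv : List Char → List Char → List Char
  | [], _ => []
  | x :: e, o => o.headD ' ' :: x :: ilv e o.tail

/-- A's first loop, reformulated over `enumerate`, performs the parity split. -/
theorem splitEnum (l : List Char) : ∀ (s : Int) (e o : List Char),
    (PySem.List.enumerate l s).foldl
      (fun (eo : List Char × List Char) (p : Int × Char) =>
        if p.1 % 2 == 0 then (eo.1 ++ [p.2], eo.2) else (eo.1, eo.2 ++ [p.2])) (e, o)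
    = if s % 2 == 0 then (e ++ (split2 l).1, o ++ (split2 l).2)
      else (e ++ (split2 l).2, o ++ (split2 l).1) := by
  induction l with
  | nil => intro s e o; simp [PySem.List.enumerate_nil, split2]
  | cons a r ih =>
    intro s e o
    rw [PySem.List.enumerate_cons]
    by_cases hs : s % 2 = 0
    · have hs1 : ¬ ((s + 1) % 2 = 0) := by omega
      simp only [List.foldl_cons, hs, beq_self_eq_true, if_true]
      rw [ih (s + 1)]
      simp [split2, hs1]
    · have hs1 : (s + 1) % 2 = 0 := by omega
      have hsne : ¬ ((s % 2 == 0) = true) := by simpa using hs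
      simp only [List.foldl_cons, if_neg hsne]
      rw [ih (s + 1)]
      simp [split2, hs1]

/-- A's first loop (index form) computes `split2`. -/
theorem loopA1 (l : List Char) :
    (PySem.List.pyRange 0 (PySem.List.len l) 1).foldl
      (fun (eo : List Char × List Char) i =>
        if i % 2 == 0 then (eo.1 ++ [PySem.List.pyGetD l i ' '], eo.2)
        else (eo.1, eo.2 ++ [PySem.List.pyGetD l i ' '])) ([], [])
    = split2 l := by
  have h := splitEnum l 0 [] []
  rw [PySem.List.enumerate_eq_map_pyRange l ' ', List.foldl_map] at h
  simpa using h

/-- A's second loop is `ilv` of the two parity strings. -/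
theorem getD_succ_tail (o : List Char) (k : Nat) : o.getD (k + 1) ' ' = o.tail.getD k ' ' := by
  cases o <;> simp

/-- The flatMap form of A's second loop is `ilv`. -/
theorem flatMap_ilv : ∀ (e o : List Char),
    (List.range e.length).flatMap (fun k => [o.getD k ' ', e.getD k ' ']) = ilv e o
  | [], o => by simp [ilv]
  | a :: e, o => by
    rw [List.length_cons, List.range_succ_eq_map, List.flatMap_cons, List.flatMap_map]
    simp only [List.getD_cons_succ, getD_succ_tail]
    rw [flatMap_ilv e o.tail]
    simp [ilv, List.getD]
    cases o <;> rfl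

/-- A's second loop is `ilv` of the two parity strings. -/
theorem loopA2 (e o : List Char) :
    (PySem.List.pyRange 0 (PySem.List.len e) 1).foldl
      (fun acc i => acc ++ [PySem.List.pyGetD o i ' ', PySem.List.pyGetD e i ' ']) []
    = ilv e o := by
  rw [PySem.List.foldl_append_eq_flatMap]
  simp only [List.nil_append, PySem.List.len_eq, PySem.List.pyRange_one, List.flatMap_map,
    zero_add, PySem.List.pyGetD_natCast]
  have hsub : ((e.length : Int) - 0).toNat = e.length := by omega
  rw [hsub, flatMap_ilv]

/-- On even-length lists, interleaving the parity split is the pairwise swap. -/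
theorem ilv_split2 (l : List Char) (h : l.length % 2 = 0) :
    ilv (split2 l).1 (split2 l).2 = pairs l := by
  induction l using pairs.induct with
  | case1 a b r ih =>
    have hr : r.length % 2 = 0 := by simp at h; omega
    simp only [split2, pairs, ilv]
    simpa using ih hr
  | case2 l hne =>
    cases l with
    | nil => simp [split2, ilv, pairs]
    | cons a t =>
      cases t with
      | nil => simp at h
      | cons b r => exact absurd rfl (hne a b r)

/-- B's loop appends `pairs` of the remainder. -/
theorem pduSwapLoop_eq (rest : List Char) : ∀ enc, pduSwapLoop enc rest = enc ++ pairs rest := by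
  induction rest using pairs.induct with
  | case1 a b r ih =>
    intro enc
    rw [pduSwapLoop]
    have hlen : 2 ≤ PySem.List.len (a :: b :: r) := by simp [PySem.List.len_eq]; omega
    rw [if_pos hlen, PySem.List.slice_from _ (by norm_num : (0:Int) ≤ 2)]
    have h2 : ((2:Int)).toNat = 2 := rfl
    rw [h2]
    simp only [List.drop_succ_cons, List.drop_zero]
    rw [ih]
    have g0 : PySem.List.pyGetD (a :: b :: r) 0 ' ' = a := by
      simp [PySem.List.pyGetD_zero_cons]
    have g1 : PySem.List.pyGetD (a :: b :: r) 1 ' ' = b := by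
      have c1 : (1:Int) = ((1:Nat):Int) := rfl
      rw [c1, PySem.List.pyGetD_natCast]; rfl
    rw [g0, g1]
    simp [pairs]
  | case2 l hne =>
    intro enc
    cases l with
    | nil => rw [pduSwapLoop]; simp [PySem.List.len_eq, pairs]
    | cons a t =>
      cases t with
      | nil => rw [pduSwapLoop]; simp [PySem.List.len_eq, pairs]
      | cons b r => exact absurd rfl (hne a b r)

theorem padded_even (phone0 : String) :
    (if PySem.Str.len phone0 % 2 ≠ 0 then phone0.toList ++ ['F'] else phone0.toList).length % 2 = 0 := by
  split_ifs with h
  · simp only [PySem.Str.len_eq] at h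
    simp only [List.length_append, List.length_cons, List.length_nil]
    omega
  · simp only [PySem.Str.len_eq] at h
    omega

-- ===== VERDICT (by name: the statement is the Claim_ definition above) =====
theorem make_mobile_check_pdu_spec : Claim_equal_make_mobile_check_pdu := by
  intro data _ hpre
  obtain ⟨h1, h2⟩ := hpre
  have ho : ∃ op, (PySem.Dict.mk data).get? "operator" = some op := by
    cases hc : (PySem.Dict.mk data).get? "operator" with
    | none =>
      exact absurd h1 (by
        simpa [PySem.Dict.keys_mk] using (PySem.Dict.get?_eq_none_iff_not_mem_keys (PySem.Dict.mk data) "operator").mp hc)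
    | some v => exact ⟨v, rfl⟩
  have hp : ∃ ph, (PySem.Dict.mk data).get? "phone" = some ph := by
    cases hc : (PySem.Dict.mk data).get? "phone" with
    | none =>
      exact absurd h2 (by
        simpa [PySem.Dict.keys_mk] using (PySem.Dict.get?_eq_none_iff_not_mem_keys (PySem.Dict.mk data) "phone").mp hc)
    | some v => exact ⟨v, rfl⟩
  obtain ⟨op, ho⟩ := ho
  obtain ⟨ph, hp⟩ := hp
  unfold Spec_make_mobile_check_pdu make_mobile_check_pdu make_mobile_check_pdu_alt
  rw [ho, hp]
  simp only [loopA1, loopA2, pduSwapLoop_eq, List.nil_append]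
  rw [ilv_split2 _ (padded_even ph)]
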